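-- pv_equiv track=rewrite | github.com/aecelaya/MIST | mist/evaluation/ranking.py | _suffix_match_metric
-- ===== SOURCE A (Python) =====
-- def _suffix_match_metric(
--     column: str, metric_keys: list[str]
-- ) -> str | None:
--     """Return the registered metric name matching `column`'s suffix.
--
--     Matches the longest registered metric name first so that, for example,
--     "WT_lesion_wise_dice" resolves to "lesion_wise_dice" rather than "dice".
--     """
--     for metric in sorted(metric_keys, key=len, reverse=True):
--         suffix = f"_{metric}"
--         if column.endswith(suffix) and len(column) > len(suffix):
--             return metric
--     return None
-- ===== SOURCE B (Python) =====
-- def _suffix_match_metric(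
--     column: str, metric_keys: list[str]
-- ) -> str | None:
--     """Single-pass longest-suffix-match scan (no sorting)."""
--     best = None
--     best_len = -1
--     for metric in metric_keys:
--         suffix = f"_{metric}"
--         if column.endswith(suffix) and len(column) > len(suffix) and len(metric) > best_len:
--             best = metric
--             best_len = len(metric)
--     return best
-- ===== Notes on version B (the rewrite author's own statement) =====
-- stated objective: simpler
-- what changed: Replaces 'sort the metric names by length descending, then return the first whose suffix matches' with a single linear scan that keeps the longest matching metric seen so far; no sort is performed.
import Mathlib
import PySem

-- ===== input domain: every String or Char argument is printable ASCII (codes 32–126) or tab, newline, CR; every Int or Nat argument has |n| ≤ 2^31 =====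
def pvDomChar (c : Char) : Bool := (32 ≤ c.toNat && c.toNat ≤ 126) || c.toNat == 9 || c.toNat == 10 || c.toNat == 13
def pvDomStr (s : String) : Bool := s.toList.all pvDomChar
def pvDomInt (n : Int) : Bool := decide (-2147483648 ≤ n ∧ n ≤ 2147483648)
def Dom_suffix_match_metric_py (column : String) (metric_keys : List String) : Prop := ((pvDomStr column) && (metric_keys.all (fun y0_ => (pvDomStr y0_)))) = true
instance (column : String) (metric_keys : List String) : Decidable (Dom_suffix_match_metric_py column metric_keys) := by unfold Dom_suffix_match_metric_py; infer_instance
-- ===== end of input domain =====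

-- ===== PORT A =====
-- B replaces A's sort-then-scan with a single longest-match pass; same return value everywhere.
def suffix_match_metric_py (column : String) (metric_keys : List String) : Option String :=
  List.find? (fun metric =>
      let suffix := "_" ++ metric
      PySem.Str.endswith column suffix && decide (PySem.Str.len column > PySem.Str.len suffix))
    (PySem.List.sorted metric_keys PySem.Str.len true)

-- ===== PORT B =====
def suffix_match_metric_py_alt (column : String) (metric_keys : List String) : Option String :=
  (metric_keys.foldl (fun (st : Option String × Int) metric =>
      let suffix := "_" ++ metric
      if PySem.Str.endswith column suffix && decide (PySem.Str.len column > PySem.Str.len suffix)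
          && decide (PySem.Str.len metric > st.2)
      then (some metric, PySem.Str.len metric)
      else st)
    ((none : Option String), (-1 : Int))).1

-- ===== PRECONDITION & SPEC =====
def Spec_suffix_match_metric_py (column : String) (metric_keys : List String) (out : Option String) : Prop := out = suffix_match_metric_py_alt column metric_keys
instance (column : String) (metric_keys : List String) (out : Option String) : Decidable (Spec_suffix_match_metric_py column metric_keys out) := by unfold Spec_suffix_match_metric_py; infer_instance

-- ===== CLAIM (what is proved, stated in full; the proofs are below) =====
def Claim_equal_suffix_match_metric_py : Prop := ∀ (column : String) (metric_keys : List String), Dom_suffix_match_metric_py column metric_keys → Spec_suffix_match_metric_py column metric_keys (suffix_match_metric_py column metric_keys)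

-- ===== LEMMAS AND PROOFS =====
-- the shared match test (proof-side abbreviation for the inline predicate of both ports)
def pvMatch (column m : String) : Bool :=
  PySem.Str.endswith column ("_" ++ m) && decide (PySem.Str.len column > PySem.Str.len ("_" ++ m))

lemma pvMatch_len_nonneg (m : String) : (0 : Int) ≤ PySem.Str.len m := by
  simp [PySem.Str.len]

-- two matching metrics of the same length are the same string (both are the same suffix of column)
lemma pvMatch_unique {c m m' : String} (hm : pvMatch c m = true) (hm' : pvMatch c m' = true)
    (hl : PySem.Str.len m = PySem.Str.len m') : m = m' := by
  simp only [pvMatch, Bool.and_eq_true, PySem.Str.endswith, PySem.Chars.endswith,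
    List.isSuffixOf_iff_suffix, String.toList_append] at hm hm'
  have h1 := hm.1; have h2 := hm'.1
  have hlen : ("_".toList ++ m.toList).length = ("_".toList ++ m'.toList).length := by
    simp only [PySem.Str.len] at hl
    simp only [List.length_append]
    omega
  have heq : "_".toList ++ m.toList = "_".toList ++ m'.toList := by
    rcases List.suffix_or_suffix_of_suffix h1 h2 with hc | hc
    · exact hc.eq_of_length hlen
    · exact (hc.eq_of_length hlen.symm).symm
  have : m.toList = m'.toList := by simpa using heq
  exact String.toList_inj.mp this

-- characterization of B's fold
lemma foldB_char (c : String) (keys : List String) : ∀ (st : Option String × Int),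
    (let r := keys.foldl (fun (st : Option String × Int) metric =>
      let suffix := "_" ++ metric
      if PySem.Str.endswith c suffix && decide (PySem.Str.len c > PySem.Str.len suffix)
          && decide (PySem.Str.len metric > st.2)
      then (some metric, PySem.Str.len metric)
      else st) st
    (r = st ∧ ∀ m ∈ keys, pvMatch c m = true → PySem.Str.len m ≤ st.2) ∨
    (∃ b ∈ keys, r = (some b, PySem.Str.len b) ∧ pvMatch c b = true ∧ st.2 < PySem.Str.len b ∧
      ∀ m ∈ keys, pvMatch c m = true → PySem.Str.len m ≤ PySem.Str.len b)) := by
  induction keys with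
  | nil => intro st; left; simp
  | cons x xs ih =>
    intro st
    simp only [List.foldl_cons]
    by_cases hcond : (PySem.Str.endswith c ("_" ++ x) && decide (PySem.Str.len c > PySem.Str.len ("_" ++ x))
          && decide (PySem.Str.len x > st.2)) = true
    · -- x updates the state
      have hPx : pvMatch c x = true := by
        simp only [Bool.and_eq_true] at hcond; simp only [pvMatch, Bool.and_eq_true]; exact hcond.1
      have hlt : st.2 < PySem.Str.len x := by
        simp only [Bool.and_eq_true, decide_eq_true_eq] at hcond; exact hcond.2
      have hstep : (if PySem.Str.endswith c ("_" ++ x) && decide (PySem.Str.len c > PySem.Str.len ("_" ++ x))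
          && decide (PySem.Str.len x > st.2) then (some x, PySem.Str.len x) else st) = (some x, PySem.Str.len x) := by
        exact if_pos hcond
      rw [hstep]
      rcases ih (some x, PySem.Str.len x) with ⟨hr, hmax⟩ | ⟨b, hb, hr, hPb, hgt, hmax⟩
      · right
        refine ⟨x, List.mem_cons_self .., hr, hPx, hlt, ?_⟩
        intro m hm hPm
        rcases List.mem_cons.mp hm with rfl | hm'
        · exact le_refl _
        · exact hmax m hm' hPm
      · right
        refine ⟨b, List.mem_cons_of_mem _ hb, hr, hPb, lt_trans hlt hgt, ?_⟩
        intro m hm hPm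
        rcases List.mem_cons.mp hm with rfl | hm'
        · exact le_of_lt hgt
        · exact hmax m hm' hPm
    · -- x does not update the state
      have hstep : (if PySem.Str.endswith c ("_" ++ x) && decide (PySem.Str.len c > PySem.Str.len ("_" ++ x))
          && decide (PySem.Str.len x > st.2) then (some x, PySem.Str.len x) else st) = st := by
        exact if_neg hcond
      rw [hstep]
      have hxle : pvMatch c x = true → PySem.Str.len x ≤ st.2 := by
        intro hPx
        simp only [pvMatch, Bool.and_eq_true] at hPx
        by_contra hnle
        apply hcond
        simp only [Bool.and_eq_true, decide_eq_true_eq]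
        exact ⟨⟨hPx.1, by simpa using hPx.2⟩, by omega⟩
      rcases ih st with ⟨hr, hmax⟩ | ⟨b, hb, hr, hPb, hgt, hmax⟩
      · left
        refine ⟨hr, ?_⟩
        intro m hm hPm
        rcases List.mem_cons.mp hm with rfl | hm'
        · exact hxle hPm
        · exact hmax m hm' hPm
      · right
        refine ⟨b, List.mem_cons_of_mem _ hb, hr, hPb, hgt, ?_⟩
        intro m hm hPm
        rcases List.mem_cons.mp hm with rfl | hm'
        · exact le_trans (hxle hPm) (le_of_lt hgt)
        · exact hmax m hm' hPm

-- characterization of A's find? over the length-descending sorted list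
lemma findA_none (c : String) (keys : List String)
    (h : suffix_match_metric_py c keys = none) : ∀ m ∈ keys, pvMatch c m = false := by
  intro m hm
  have := List.find?_eq_none.mp h m ((PySem.List.mem_sorted keys PySem.Str.len true m).mpr hm)
  simpa [pvMatch] using this

lemma findA_some (c : String) (keys : List String) (a : String)
    (h : suffix_match_metric_py c keys = some a) :
    a ∈ keys ∧ pvMatch c a = true ∧ ∀ m ∈ keys, pvMatch c m = true → PySem.Str.len m ≤ PySem.Str.len a := by
  unfold suffix_match_metric_py at h
  rcases List.find?_eq_some_iff_append.mp h with ⟨hPa, as, bs, hsplit, hprev⟩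
  have hmemA : a ∈ PySem.List.sorted keys PySem.Str.len true := by
    rw [hsplit]; exact List.mem_append_right _ (List.mem_cons_self ..)
  refine ⟨(PySem.List.mem_sorted keys PySem.Str.len true a).mp hmemA, by simpa [pvMatch] using hPa, ?_⟩
  intro m hm hPm
  have hms : m ∈ PySem.List.sorted keys PySem.Str.len true :=
    (PySem.List.mem_sorted keys PySem.Str.len true m).mpr hm
  rw [hsplit] at hms
  have hpw := PySem.List.sorted_pairwise_rev keys PySem.Str.len
  rw [hsplit] at hpw
  rcases List.mem_append.mp hms with hmas | hmbs
  · exfalso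
    have hfalse : (!(pvMatch c m)) = true := hprev m hmas
    rw [hPm] at hfalse
    simp at hfalse
  · rcases List.mem_cons.mp hmbs with rfl | hmbs'
    · exact le_refl _
    · have := (List.pairwise_append.mp hpw).2.1
      exact (List.pairwise_cons.mp this).1 m hmbs'

-- ===== VERDICT (by name: the statement is the Claim_ definition above) =====
theorem suffix_match_metric_py_spec : Claim_equal_suffix_match_metric_py := by
  intro column metric_keys _
  unfold Spec_suffix_match_metric_py
  have hB := foldB_char column metric_keys ((none : Option String), (-1 : Int))
  simp only at hB
  cases hA : suffix_match_metric_py column metric_keys with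
  | none =>
    have hnone := findA_none column metric_keys hA
    rcases hB with ⟨hr, _⟩ | ⟨b, hb, _, hPb, _, _⟩
    · unfold suffix_match_metric_py_alt
      rw [hr]
    · rw [hnone b hb] at hPb; exact absurd hPb (by simp)
  | some a =>
    obtain ⟨haK, hPa, hamax⟩ := findA_some column metric_keys a hA
    rcases hB with ⟨_, hmax⟩ | ⟨b, hb, hr, hPb, _, hbmax⟩
    · have := hmax a haK hPa
      have := pvMatch_len_nonneg a
      omega
    · have h1 := hamax b hb hPb
      have h2 := hbmax a haK hPa
      have hab : a = b := pvMatch_unique hPa hPb (le_antisymm h2 h1)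
      unfold suffix_match_metric_py_alt
      rw [hr, ← hab]
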